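-- pv_equiv track=rewrite | github.com/Myusol/Algorithm-Study | hoon/week9/2512.py | find
-- ===== SOURCE A (Python) =====
-- def find(requests, M):
--     l, r = 0, max(requests)
--     answer = 0
--     while l <= r:
--         mid = (l + r) // 2
--         total = sum(min(r, mid) for r in requests)
--         if total <= M:
--             answer = mid
--             l = mid + 1
--         else:
--             r = mid - 1
--     return answer
-- ===== SOURCE B (Python) =====
-- def find(requests, M):
--     R = max(requests)
--     if R < 0:
--         return 0
--     s = sorted(requests)
--     n = len(s)
--     total = sum(s)
--     if total <= M:
--         return R
--     pre = total
--     for k in range(n - 1, -1, -1):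
--         pre -= s[k]                      # pre = s[0] + ... + s[k-1]
--         lo = max(s[k - 1], 0) if k > 0 else 0
--         hi = s[k] - 1                    # mids in [lo, hi] cap exactly the top n-k requests
--         if hi < lo:
--             continue
--         cand = (M - pre) // (n - k)      # largest mid in this segment with pre + mid*(n-k) <= M
--         if cand >= lo:
--             return min(cand, hi)
--     return 0
-- ===== Notes on version B (the rewrite author's own statement) =====
-- stated objective: faster
-- what changed: Replaces A's binary search over the answer (recomputing sum(min(r,mid)) over all requests at every probe) by sorting the requests once, sweeping the sorted segments from the top with a running prefix sum, and solving the largest feasible cap in a segment in closed form with one floor division.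
import Mathlib
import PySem

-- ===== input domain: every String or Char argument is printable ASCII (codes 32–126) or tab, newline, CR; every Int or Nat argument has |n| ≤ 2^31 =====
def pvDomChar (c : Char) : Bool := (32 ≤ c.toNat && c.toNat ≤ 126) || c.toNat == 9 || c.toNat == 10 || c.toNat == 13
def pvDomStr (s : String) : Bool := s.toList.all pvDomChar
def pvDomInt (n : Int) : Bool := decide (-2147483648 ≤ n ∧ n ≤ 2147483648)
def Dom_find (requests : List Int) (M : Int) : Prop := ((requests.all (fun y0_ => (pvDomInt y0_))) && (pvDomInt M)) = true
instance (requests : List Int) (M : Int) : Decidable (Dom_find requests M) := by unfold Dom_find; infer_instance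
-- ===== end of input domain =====

-- B replaces A's binary search over the answer value (re-summing min(r,mid) each probe) by
-- sort + running prefix sum with a closed-form largest feasible cap per sorted segment (objective: faster).


-- ===== PORT A =====
-- total = sum(min(r, mid) for r in requests)  (the generator's r shadows the bound r)
def pvSumMin (requests : List Int) (mid : Int) : Int :=
  (requests.map (fun r => min r mid)).sum

-- the while-loop of A, state (l, r, answer)
def findLoop (requests : List Int) (M l r answer : Int) : Int :=
  if h : l ≤ r then
    let mid := PySem.Int.floordiv (l + r) 2
    let total := pvSumMin requests mid
    if total ≤ M then findLoop requests M (mid + 1) r mid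
    else findLoop requests M l (mid - 1) answer
  else answer
termination_by (r + 1 - l).toNat
decreasing_by
  · have hb := PySem.Int.floordiv_two_mid_bounds h; omega
  · have hb := PySem.Int.floordiv_two_mid_bounds h; omega

def find (requests : List Int) (M : Int) : Int :=
  match PySem.List.max? requests (fun x => x) with
  | none => 0            -- max(requests) raises ValueError on []; excluded by Pre_find
  | some r => findLoop requests M 0 r 0

-- ===== PORT B =====
-- the descending index loop 'for k in range(n-1, -1, -1)'; the Nat argument k+1 plays index k,
-- pre at entry of the body is s[0]+…+s[k] (the body first does 'pre -= s[k]').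
-- s[k] / s[k-1] are always in range in B's Python, so List.getD is exact here.
def segLoop (s : List Int) (M n : Int) : Nat → Int → Int
  | 0, _ => 0
  | k + 1, pre =>
    let sk := s.getD k 0
    let pre' := pre - sk
    let lo := if 0 < k then max (s.getD (k - 1) 0) 0 else 0
    let hi := sk - 1
    if hi < lo then segLoop s M n k pre'
    else
      let cand := PySem.Int.floordiv (M - pre') (n - (k : Int))
      if lo ≤ cand then min cand hi
      else segLoop s M n k pre'

def find_alt (requests : List Int) (M : Int) : Int :=
  match PySem.List.max? requests (fun x => x) with
  | none => 0            -- max(requests) raises ValueError on []; excluded by Pre_find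
  | some r =>
    if r < 0 then 0
    else
      let s := PySem.List.sorted requests (fun x => x) false
      let n := s.length
      let total := s.sum
      if total ≤ M then r
      else segLoop s M (n : Int) n total

-- ===== PRECONDITION & SPEC =====
-- Pre_ excludes only the empty list, on which A's max(requests) raises ValueError.
def Pre_find (requests : List Int) (M : Int) : Prop := requests ≠ []
instance (requests : List Int) (M : Int) : Decidable (Pre_find requests M) := by unfold Pre_find; infer_instance
def pvWitness_find : List Int × Int := ([1, 9, 7, 3], 10)

def Spec_find (requests : List Int) (M : Int) (out : Int) : Prop := out = find_alt requests M
instance (requests : List Int) (M : Int) (out : Int) : Decidable (Spec_find requests M out) := by unfold Spec_find; infer_instance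

-- ===== CLAIM (what is proved, stated in full; the proofs are below) =====
def Claim_equal_find : Prop := ∀ (requests : List Int) (M : Int), Dom_find requests M → Pre_find requests M → Spec_find requests M (find requests M)

-- ===== LEMMAS AND PROOFS =====

-- Characterisation both programs satisfy: ans is the largest mid in [0, R] with sum(min(r,mid)) ≤ M, else 0.
def pvChar (xs : List Int) (M R a : Int) : Prop :=
  (a = 0 ∧ ∀ m : Int, 0 ≤ m → m ≤ R → M < pvSumMin xs m) ∨
  (0 ≤ a ∧ a ≤ R ∧ pvSumMin xs a ≤ M ∧ ∀ m : Int, a < m → m ≤ R → M < pvSumMin xs m)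

theorem pvChar_unique (xs : List Int) (M R a b : Int)
    (ha : pvChar xs M R a) (hb : pvChar xs M R b) : a = b := by
  rcases ha with ⟨ha0, hano⟩ | ⟨ha0, haR, haf, hano⟩ <;>
    rcases hb with ⟨hb0, hbno⟩ | ⟨hb0, hbR, hbf, hbno⟩
  · omega
  · exact absurd hbf (by have := hano b hb0 hbR; omega)
  · exact absurd haf (by have := hbno a ha0 haR; omega)
  · rcases lt_trichotomy a b with h | h | h
    · exact absurd hbf (by have := hano b h hbR; omega)
    · exact h
    · exact absurd haf (by have := hbno a h haR; omega)

theorem pvSumMin_mono (xs : List Int) (m m' : Int) (h : m ≤ m') :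
    pvSumMin xs m ≤ pvSumMin xs m' := by
  unfold pvSumMin
  exact List.sum_le_sum (fun r _ => min_le_min le_rfl h)

theorem pvSumMin_perm (xs ys : List Int) (h : xs.Perm ys) (m : Int) :
    pvSumMin xs m = pvSumMin ys m := (h.map _).sum_eq

theorem pvSumMin_split (t1 t2 : List Int) (m : Int)
    (h1 : ∀ x ∈ t1, x ≤ m) (h2 : ∀ x ∈ t2, m < x) :
    pvSumMin (t1 ++ t2) m = t1.sum + m * t2.length := by
  unfold pvSumMin
  rw [List.map_append, List.sum_append]
  have e1 : t1.map (fun r => min r m) = t1 := by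
    rw [List.map_congr_left (fun x hx => min_eq_left (h1 x hx))]; exact List.map_id t1
  have e2 : t2.map (fun r => min r m) = t2.map (fun _ => m) := by
    exact List.map_congr_left (fun x hx => min_eq_right (le_of_lt (h2 x hx)))
  rw [e1, e2]
  simp [mul_comm]

theorem pvSumMin_all_le (xs : List Int) (m : Int) (h : ∀ x ∈ xs, x ≤ m) :
    pvSumMin xs m = xs.sum := by
  have := pvSumMin_split xs [] m h (by simp)
  simpa using this

theorem pvChar_congr (xs ys : List Int) (M R a : Int)
    (h : ∀ m, pvSumMin xs m = pvSumMin ys m) (hc : pvChar xs M R a) : pvChar ys M R a := by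
  unfold pvChar at hc ⊢
  rcases hc with ⟨h0, hno⟩ | ⟨h0, hR, hf, hno⟩
  · exact Or.inl ⟨h0, fun m hm hmR => h m ▸ hno m hm hmR⟩
  · exact Or.inr ⟨h0, hR, h a ▸ hf, fun m hm hmR => h m ▸ hno m hm hmR⟩

-- monotone elements of a pairwise-sorted list, getD form
theorem pv_sorted_getD_le (s : List Int) (hs : s.Pairwise (· ≤ ·)) (i j : Nat)
    (hij : i ≤ j) (hj : j < s.length) : s.getD i 0 ≤ s.getD j 0 := by
  rw [List.getD_eq_getElem s 0 (by omega), List.getD_eq_getElem s 0 hj]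
  rcases Nat.lt_or_ge i j with h | h
  · exact List.pairwise_iff_getElem.mp hs i j (by omega) hj h
  · have : i = j := by omega
    subst this; rfl

-- the per-segment closed form: for lo-style bounds around index k,
-- sum(min(r, m)) = (first k elements) + m * (count above)
theorem pv_seg_formula (s : List Int) (hs : s.Pairwise (· ≤ ·)) (k : Nat) (hk : k < s.length)
    (m : Int) (hlow : ∀ i : Nat, i < k → s.getD i 0 ≤ m) (hup : m < s.getD k 0) :
    pvSumMin s m = (s.take k).sum + m * ((s.length : Int) - k) := by
  have hsplit := pvSumMin_split (s.take k) (s.drop k) m ?_ ?_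
  · rw [List.take_append_drop] at hsplit
    rw [hsplit, List.length_drop]
    congr 1
    push_cast [Nat.cast_sub (le_of_lt hk)]
    ring
  · intro x hx
    rw [List.mem_take_iff_getElem] at hx
    obtain ⟨i, hi, he⟩ := hx
    have : s.getD i 0 = x := by
      rw [List.getD_eq_getElem s 0 (by omega)]; exact he
    exact this ▸ hlow i (by omega)
  · intro x hx
    obtain ⟨i, hi, he⟩ := List.mem_iff_getElem.mp hx
    rw [List.getElem_drop] at he
    have hlen : k + i < s.length := by simp at hi; omega
    have : s.getD k 0 ≤ s.getD (k + i) 0 := pv_sorted_getD_le s hs k (k + i) (by omega) hlen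
    have : s.getD (k + i) 0 = x := by
      rw [List.getD_eq_getElem s 0 hlen]; exact he
    omega

-- ===== A side: the binary search satisfies pvChar =====
theorem findLoop_char (requests : List Int) (M R : Int) :
    ∀ (l r ans : Int), 0 ≤ l → r ≤ R → (l = 0 → ans = 0) →
      (0 < l → ans = l - 1 ∧ pvSumMin requests (l - 1) ≤ M ∧ l ≤ R + 1) →
      (∀ m : Int, r < m → m ≤ R → M < pvSumMin requests m) →
      pvChar requests M R (findLoop requests M l r ans) := by
  intro l r ans
  fun_induction findLoop requests M l r ans with
  | case1 l r ans h mid total htot ih =>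
    intro h0 hR hz hpos hno
    have hb := PySem.Int.floordiv_two_mid_bounds h
    apply ih
    · omega
    · exact hR
    · omega
    · intro _
      refine ⟨by omega, ?_, by omega⟩
      have : mid + 1 - 1 = mid := by omega
      rw [this]; exact htot
    · exact hno
  | case2 l r ans h mid total htot ih =>
    intro h0 hR hz hpos hno
    apply ih h0 (by have hb := PySem.Int.floordiv_two_mid_bounds h; omega) hz hpos
    intro m hm hmR
    rcases le_or_gt m r with hmr | hmr
    · have hmono := pvSumMin_mono requests mid m (by omega)
      omega
    · exact hno m hmr hmR
  | case3 l r ans h =>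
    intro h0 hR hz hpos hno
    rcases eq_or_lt_of_le h0 with h0' | h0'
    · left
      refine ⟨(hz h0'.symm).symm ▸ rfl, fun m hm hmR => hno m (by omega) hmR⟩
    · right
      obtain ⟨hans, hf, hlR⟩ := hpos h0'
      exact ⟨by omega, by omega, hans ▸ hf, fun m hm hmR => hno m (by omega) hmR⟩

-- ===== B side: the segment scan satisfies pvChar =====
theorem segLoop_char (s : List Int) (M R : Int) (hs : s.Pairwise (· ≤ ·))
    (hub : ∀ x ∈ s, x ≤ R) :
    ∀ (k : Nat) (pre : Int), k ≤ s.length → pre = (s.take k).sum →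
      (∀ m : Int, 0 ≤ m → m ≤ R →
        (if k = 0 then 0 else max (s.getD (k - 1) 0) 0) ≤ m → M < pvSumMin s m) →
      pvChar s M R (segLoop s M (s.length : Int) k pre) := by
  intro k
  induction k with
  | zero =>
    intro pre _ _ hinv
    left
    exact ⟨rfl, fun m hm hmR => hinv m hm hmR (by simpa using hm)⟩
  | succ k ih =>
    intro pre hk hpre hinv
    have hklen : k < s.length := by omega
    have hskmem : s.getD k 0 ∈ s := by
      rw [List.getD_eq_getElem s 0 hklen]; exact List.getElem_mem hklen
    have hskR : s.getD k 0 ≤ R := hub _ hskmem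
    have hpre' : pre - s.getD k 0 = (s.take k).sum := by
      rw [hpre, List.sum_take_succ s k hklen, List.getD_eq_getElem s 0 hklen]; ring
    set lo : Int := if 0 < k then max (s.getD (k - 1) 0) 0 else 0 with hlo
    set cand : Int := PySem.Int.floordiv (M - (pre - s.getD k 0)) ((s.length : Int) - (k : Int)) with hcdef
    have hunf : segLoop s M (s.length : Int) (k + 1) pre =
        if s.getD k 0 - 1 < lo then segLoop s M (s.length : Int) k (pre - s.getD k 0)
        else if lo ≤ cand then min cand (s.getD k 0 - 1)
        else segLoop s M (s.length : Int) k (pre - s.getD k 0) := by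
      rw [hlo, hcdef]; rfl
    have hlo0 : 0 ≤ lo := by rw [hlo]; split <;> simp
    -- glb of the shrunk invariant coincides with lo
    have hglb_lo : ∀ m : Int, 0 ≤ m →
        (if k = 0 then 0 else max (s.getD (k - 1) 0) 0) ≤ m → lo ≤ m := by
      intro m hm hg
      rw [hlo]
      rcases Nat.eq_zero_or_pos k with h0 | h0
      · simp [h0]; omega
      · rw [if_pos h0]
        rw [if_neg (by omega : ¬ k = 0)] at hg
        omega
    -- in-segment closed form
    have hseg : ∀ m : Int, lo ≤ m → m < s.getD k 0 →
        pvSumMin s m = (s.take k).sum + m * ((s.length : Int) - k) := by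
      intro m hm1 hm2
      apply pv_seg_formula s hs k hklen m ?_ hm2
      intro i hi
      have h1 : s.getD i 0 ≤ s.getD (k - 1) 0 := pv_sorted_getD_le s hs i (k - 1) (by omega) (by omega)
      have hkpos : 0 < k := by omega
      rw [hlo, if_pos hkpos] at hm1
      omega
    have hd : (0 : Int) < (s.length : Int) - k := by
      have := hklen; omega
    have hbr : ∀ q : Int, q ≤ cand ↔ q * ((s.length : Int) - k) ≤ M - (pre - s.getD k 0) := by
      intro q; rw [hcdef]; exact PySem.Int.le_floordiv_iff_mul_le hd
    -- old invariant, restated at max(s[k],0)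
    have hold : ∀ m : Int, 0 ≤ m → m ≤ R → max (s.getD k 0) 0 ≤ m → M < pvSumMin s m := by
      intro m hm hmR hmax
      refine hinv m hm hmR ?_
      rw [if_neg (Nat.succ_ne_zero k)]
      have e : k + 1 - 1 = k := rfl
      rw [e]
      omega
    rw [hunf]
    by_cases hempty : s.getD k 0 - 1 < lo
    · rw [if_pos hempty]
      apply ih _ (by omega) hpre'
      intro m hm hmR hg
      exact hold m hm hmR (by have := hglb_lo m hm hg; omega)
    · rw [if_neg hempty]
      by_cases hcand : lo ≤ cand
      · rw [if_pos hcand]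
        right
        have hansR : min cand (s.getD k 0 - 1) ≤ R := by
          have : min cand (s.getD k 0 - 1) ≤ s.getD k 0 - 1 := min_le_right _ _
          omega
        refine ⟨by omega, hansR, ?_, ?_⟩
        · -- feasible at the returned value
          have hin : lo ≤ min cand (s.getD k 0 - 1) := le_min hcand (by omega)
          rw [hseg _ hin (by omega), ← hpre']
          have hle : min cand (s.getD k 0 - 1) ≤ cand := min_le_left _ _
          have := (hbr (min cand (s.getD k 0 - 1))).mp hle
          omega
        · -- nothing feasible above it
          intro m hm hmR
          rcases le_or_gt (max (s.getD k 0) 0) m with hcase | hcase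
          · exact hold m (by omega) hmR hcase
          · have hmhi : m < s.getD k 0 := by omega
            have hmlo : lo ≤ m := by omega
            rw [hseg m hmlo hmhi, ← hpre']
            have hmc : ¬ m ≤ cand := by omega
            have := (hbr m).not.mp hmc
            omega
      · rw [if_neg hcand]
        apply ih _ (by omega) hpre'
        intro m hm hmR hg
        have hmlo : lo ≤ m := hglb_lo m hm hg
        rcases le_or_gt (max (s.getD k 0) 0) m with hcase | hcase
        · exact hold m hm hmR hcase
        · have hmhi : m < s.getD k 0 := by omega
          rw [hseg m hmlo hmhi, ← hpre']
          have hmc : ¬ m ≤ cand := by omega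
          have := (hbr m).not.mp hmc
          omega

theorem find_alt_char (requests : List Int) (M R : Int)
    (hreq : requests ≠ [])
    (hmax : PySem.List.max? requests (fun x => x) = some R) :
    pvChar requests M R (find_alt requests M) := by
  have hmem : R ∈ requests := PySem.List.max?_mem hmax
  have hub : ∀ x ∈ requests, x ≤ R := PySem.List.max?_isMax hmax
  set s : List Int := PySem.List.sorted requests (fun x => x) false with hsdef
  have hB : find_alt requests M =
      (if R < 0 then 0
       else if s.sum ≤ M then R
       else segLoop s M (s.length : Int) s.length s.sum) := by
    rw [hsdef]; unfold find_alt; rw [hmax]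
  have hperm : s.Perm requests := by rw [hsdef]; exact PySem.List.sorted_perm requests _ false
  have hpv : ∀ m, pvSumMin s m = pvSumMin requests m := pvSumMin_perm s requests hperm
  have hsum : s.sum = requests.sum := hperm.sum_eq
  have hsorted : s.Pairwise (· ≤ ·) := by
    rw [hsdef]; exact PySem.List.sorted_pairwise requests (fun x : Int => x)
  have hubs : ∀ x ∈ s, x ≤ R := fun x hx => hub x (hperm.mem_iff.mp hx)
  have hall : pvSumMin requests R = requests.sum := pvSumMin_all_le requests R hub
  rw [hB]
  by_cases hRneg : R < 0
  · rw [if_pos hRneg]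
    left
    exact ⟨rfl, fun m hm hmR => by omega⟩
  · rw [if_neg hRneg]
    by_cases htot : s.sum ≤ M
    · rw [if_pos htot]
      right
      refine ⟨by omega, le_refl R, by omega, fun m hm hmR => by omega⟩
    · rw [if_neg htot]
      have hslen : 0 < s.length := by
        rw [hperm.length_eq]
        exact List.length_pos_iff.mpr hreq
      apply pvChar_congr s requests M R _ hpv
      apply segLoop_char s M R hsorted hubs s.length s.sum (le_refl _) (by simp)
      intro m hm hmR hg
      have hk0 : s.length ≠ 0 := by omega
      rw [if_neg hk0] at hg
      have hg' : s.getD (s.length - 1) 0 ≤ m := by omega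
      have hallm : pvSumMin s m = s.sum := by
        apply pvSumMin_all_le
        intro x hx
        obtain ⟨i, hi, he⟩ := List.mem_iff_getElem.mp hx
        have h2 : s.getD i 0 ≤ s.getD (s.length - 1) 0 :=
          pv_sorted_getD_le s hsorted i (s.length - 1) (by omega) (by omega)
        rw [List.getD_eq_getElem s 0 hi] at h2
        omega
      omega

-- ===== VERDICT (by name: the statement is the Claim_ definition above) =====
theorem find_spec : Claim_equal_find := by
  intro requests M _ hpre
  unfold Spec_find
  have hpre' : requests ≠ [] := hpre
  obtain ⟨R, hmax⟩ : ∃ R, PySem.List.max? requests (fun x => x) = some R := by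
    cases h : PySem.List.max? requests (fun x => x) with
    | none => exact absurd ((PySem.List.max?_eq_none_iff requests _).mp h) hpre'
    | some R => exact ⟨R, rfl⟩
  have hA : pvChar requests M R (find requests M) := by
    unfold find
    rw [hmax]
    exact findLoop_char requests M R 0 R 0 le_rfl le_rfl (fun _ => rfl)
      (by omega) (fun m hm hmR => by omega)
  exact pvChar_unique requests M R _ _ hA (find_alt_char requests M R hpre' hmax)
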